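-- pv_equiv track=rewrite | github.com/Snowflake-Labs/polaris-local-forge | src/polaris_local_forge/l2c/sync.py | _compute_transfer_plan
-- ===== SOURCE A (Python) =====
-- def _compute_transfer_plan(
--     src_objects: dict[str, int],
--     dst_objects: dict[str, int],
--     force: bool,
-- ) -> list[str]:
--     """Return list of keys that need to be transferred.
--
--     Smart sync: transfer keys that are new or have a different size.
--     Force: transfer all source keys.
--     """
--     if force:
--         return sorted(src_objects.keys())
--     return sorted(
--         k for k, size in src_objects.items()
--         if k not in dst_objects or dst_objects[k] != size
--     )
-- ===== SOURCE B (Python) =====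
-- def _compute_transfer_plan(
--     src_objects: dict[str, int],
--     dst_objects: dict[str, int],
--     force: bool,
-- ) -> list[str]:
--     """Return list of keys that need to be transferred.
--
--     Sort-merge plan: sort both sides by key once, then a single two-pointer
--     sweep emits (already in sorted order) each source key that is absent on
--     the destination side or present with a different size.
--     """
--     if force:
--         return sorted(src_objects.keys())
--     s = sorted(src_objects.items(), key=lambda kv: kv[0])
--     d = sorted(dst_objects.items(), key=lambda kv: kv[0])
--     out = []
--     i = j = 0
--     while i < len(s):
--         k, size = s[i]
--         if j < len(d) and d[j][0] < k:
--             j += 1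
--         elif j < len(d) and d[j][0] == k:
--             if d[j][1] != size:
--                 out.append(k)
--             i += 1
--             j += 1
--         else:
--             out.append(k)
--             i += 1
--     return out
-- ===== Notes on version B (the rewrite author's own statement) =====
-- stated objective: alternative
-- what changed: A does a dict membership test and lookup per source key and then sorts the survivors; B instead sorts both item lists by key once and runs a single two-pointer merge sweep that emits new or size-changed keys already in sorted order, with no dict lookups at all.
import Mathlib
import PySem

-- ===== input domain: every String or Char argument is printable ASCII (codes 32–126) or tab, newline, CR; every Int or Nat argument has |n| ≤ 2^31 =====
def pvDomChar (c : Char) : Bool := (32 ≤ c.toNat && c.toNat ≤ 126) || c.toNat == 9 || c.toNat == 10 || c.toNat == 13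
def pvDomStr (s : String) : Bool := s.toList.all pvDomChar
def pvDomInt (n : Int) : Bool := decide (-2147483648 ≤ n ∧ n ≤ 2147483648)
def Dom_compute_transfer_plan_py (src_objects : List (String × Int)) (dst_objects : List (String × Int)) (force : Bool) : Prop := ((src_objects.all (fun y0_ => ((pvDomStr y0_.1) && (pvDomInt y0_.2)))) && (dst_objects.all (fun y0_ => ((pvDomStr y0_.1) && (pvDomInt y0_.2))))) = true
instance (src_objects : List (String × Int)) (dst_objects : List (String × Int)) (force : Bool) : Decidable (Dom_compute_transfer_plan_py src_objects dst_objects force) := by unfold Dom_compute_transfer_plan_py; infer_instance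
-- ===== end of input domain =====

-- B replaces A's per-key dict membership/lookup loop by sorting both item lists
-- by key and a single two-pointer merge sweep (alternative algorithm; same cost).


-- ===== PORT A =====
-- if force: sorted(src.keys()); else sorted(k for k, size in src.items()
--   if k not in dst or dst[k] != size)
def compute_transfer_plan_py (src_objects : List (String × Int)) (dst_objects : List (String × Int)) (force : Bool) : List String :=
  if force then
    PySem.List.sorted (src_objects.map Prod.fst) (fun k => k) false
  else
    let d := PySem.Dict.mk dst_objects
    PySem.List.sorted
      ((src_objects.filter (fun p => !(d.contains p.1) || !(d.get? p.1 == some p.2))).map Prod.fst)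
      (fun k => k) false

-- ===== PORT B =====
-- the while loop of Source B: i walks s, j walks d; append k when the dst cursor is
-- past k or exhausted, skip smaller dst keys, on an equal key compare sizes
def pvMergePlan : List (String × Int) → List (String × Int) → List String
  | [], _ => []
  | p :: s, [] => p.1 :: pvMergePlan s []
  | p :: s, q :: d =>
    if q.1 < p.1 then pvMergePlan (p :: s) d
    else if q.1 == p.1 then
      (if q.2 != p.2 then [p.1] else []) ++ pvMergePlan s d
    else p.1 :: pvMergePlan s (q :: d)
  termination_by s d => s.length + d.length
  decreasing_by all_goals (simp only [List.length_cons]; omega)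

-- if force: sorted(src.keys()); else sort both item lists by key and merge
def compute_transfer_plan_py_alt (src_objects : List (String × Int)) (dst_objects : List (String × Int)) (force : Bool) : List String :=
  if force then
    PySem.List.sorted (src_objects.map Prod.fst) (fun k => k) false
  else
    pvMergePlan (PySem.List.sorted src_objects (fun kv => kv.1) false)
                (PySem.List.sorted dst_objects (fun kv => kv.1) false)

-- ===== PRECONDITION & SPEC =====
-- Pre_ requires the keys of each association list to be distinct: both parameters are
-- Python dicts, whose keys are always unique, so no input A accepts is excluded.
def Pre_compute_transfer_plan_py (src_objects : List (String × Int)) (dst_objects : List (String × Int)) (force : Bool) : Prop :=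
  (src_objects.map Prod.fst).Nodup ∧ (dst_objects.map Prod.fst).Nodup
instance (src_objects : List (String × Int)) (dst_objects : List (String × Int)) (force : Bool) : Decidable (Pre_compute_transfer_plan_py src_objects dst_objects force) := by unfold Pre_compute_transfer_plan_py; infer_instance

def pvWitness_compute_transfer_plan_py : (List (String × Int)) × (List (String × Int)) × Bool :=
  ([("a", 3), ("b", 5)], [("b", 4)], false)

def Spec_compute_transfer_plan_py (src_objects : List (String × Int)) (dst_objects : List (String × Int)) (force : Bool) (out : List String) : Prop := out = compute_transfer_plan_py_alt src_objects dst_objects force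
instance (src_objects : List (String × Int)) (dst_objects : List (String × Int)) (force : Bool) (out : List String) : Decidable (Spec_compute_transfer_plan_py src_objects dst_objects force out) := by unfold Spec_compute_transfer_plan_py; infer_instance

-- ===== CLAIM (what is proved, stated in full; the proofs are below) =====
def Claim_equal_compute_transfer_plan_py : Prop := ∀ (src_objects : List (String × Int)) (dst_objects : List (String × Int)) (force : Bool), Dom_compute_transfer_plan_py src_objects dst_objects force → Pre_compute_transfer_plan_py src_objects dst_objects force → Spec_compute_transfer_plan_py src_objects dst_objects force (compute_transfer_plan_py src_objects dst_objects force)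

-- ===== LEMMAS AND PROOFS =====

-- A's per-element test (new key, or present with a different size) is exactly
-- non-membership of the (key, size) pair in dst — provided dst's keys are distinct.
theorem filter_pred_eq_not_mem (dst : List (String × Int))
    (hd : (dst.map Prod.fst).Nodup) (p : String × Int) :
    (!((PySem.Dict.mk dst).contains p.1) || !((PySem.Dict.mk dst).get? p.1 == some p.2))
      = !(decide (p ∈ dst)) := by
  have hkeys : (PySem.Dict.mk dst).keys.Nodup := hd
  rw [Bool.eq_iff_iff]
  simp only [Bool.or_eq_true, Bool.not_eq_true', beq_eq_false_iff_ne, ne_eq,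
    decide_eq_false_iff_not]
  rw [PySem.Dict.contains_eq_isSome_get?]
  have hmem := PySem.Dict.get?_eq_some_iff_mem_items (PySem.Dict.mk dst) p.1 p.2 hkeys
  have hitems : (PySem.Dict.mk dst).items = dst := rfl
  rw [hitems] at hmem
  constructor
  · rintro (h | h)
    · intro hp; rw [← hmem] at hp; · simp [hp] at h
    · intro hp; exact h (hmem.mpr (by rw [← Prod.mk.eta (p := p)] at hp; exact hp))
  · intro h
    cases hg : (PySem.Dict.mk dst).get? p.1 with
    | none => left; simp
    | some v =>
      right; intro hv; rw [hv] at hg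
      exact h (by have := hmem.mp hg; simpa using this)

-- the merge over key-strictly-increasing lists keeps exactly the src pairs not in dst
theorem pvMergePlan_eq_filter (s d : List (String × Int)) :
    s.Pairwise (fun a b => a.1 < b.1) → d.Pairwise (fun a b => a.1 < b.1) →
    pvMergePlan s d = (s.filter (fun p => !(decide (p ∈ d)))).map Prod.fst := by
  induction s, d using pvMergePlan.induct with
  | case1 d => intro _ _; simp [pvMergePlan]
  | case2 p s ih =>
    intro hs _
    rw [pvMergePlan, ih hs.of_cons List.Pairwise.nil]
    simp
  | case3 p s q d hlt ih =>
    -- q.1 < p.1 : q can match no element of p :: s; drop the dst head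
    intro hs hd
    rw [pvMergePlan, if_pos hlt]
    have hkey : ∀ x ∈ p :: s, p.1 ≤ x.1 := by
      intro x hx
      rcases List.mem_cons.mp hx with rfl | hx
      · exact le_refl _
      · exact le_of_lt (List.rel_of_pairwise_cons hs hx)
    have hfc : ∀ x ∈ p :: s, (!(decide (x ∈ q :: d))) = (!(decide (x ∈ d))) := by
      intro x hx
      have hne : x ≠ q := by
        intro he
        have := hkey x hx
        rw [he] at this
        exact absurd hlt (not_lt.mpr this)
      simp [List.mem_cons, hne]
    rw [List.filter_congr hfc]
    exact ih hs hd.of_cons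
  | case4 p s q d hlt heq ih =>
    -- q.1 = p.1 : compare the two sizes, advance on both sides
    intro hs hd
    rw [pvMergePlan, if_neg hlt, if_pos heq]
    have hqp : q.1 = p.1 := by simpa using heq
    have hdk : ∀ x ∈ d, q.1 < x.1 := fun x hx => List.rel_of_pairwise_cons hd hx
    have hsk : ∀ x ∈ s, p.1 < x.1 := fun x hx => List.rel_of_pairwise_cons hs hx
    have hfc : ∀ x ∈ s, (!(decide (x ∈ q :: d))) = (!(decide (x ∈ d))) := by
      intro x hx
      have hne : x ≠ q := by
        intro he; have := hsk x hx; rw [he, hqp] at this; exact lt_irrefl _ this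
      simp [List.mem_cons, hne]
    by_cases hv : q.2 = p.2
    · -- equal pair: p = q ∈ q :: d, dropped on both sides
      have hpq : p = q := Prod.ext hqp.symm hv.symm
      have hmem : p ∈ q :: d := by rw [hpq]; exact List.mem_cons_self
      simp only [bne, hv, beq_self_eq_true, Bool.not_true]
      rw [List.filter_cons_of_neg (by simp [hmem]), List.filter_congr hfc]
      exact ih hs.of_cons hd.of_cons
    · -- sizes differ: p ∉ q :: d (only q has p's key, and its size differs)
      have hnmem : p ∉ q :: d := by
        intro hp
        rcases List.mem_cons.mp hp with he | hp
        · exact hv (by rw [he])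
        · have := hdk p hp; rw [hqp] at this; exact lt_irrefl _ this
      rw [if_pos (by simp [bne, hv] : (q.2 != p.2) = true)]
      rw [List.filter_cons_of_pos (by simp [hnmem]), List.filter_congr hfc]
      simp [ih hs.of_cons hd.of_cons]
  | case5 p s q d hlt heq ih =>
    -- p.1 < q.1 : p matches nothing in q :: d, emit it
    intro hs hd
    rw [pvMergePlan, if_neg hlt, if_neg heq]
    have hplt : p.1 < q.1 := by
      rcases lt_trichotomy q.1 p.1 with h | h | h
      · exact absurd h hlt
      · exact absurd (by simpa using h) heq
      · exact h
    have hnmem : p ∉ q :: d := by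
      intro hp
      rcases List.mem_cons.mp hp with he | hp
      · rw [he] at hplt; exact lt_irrefl _ hplt
      · have := List.rel_of_pairwise_cons hd hp
        exact lt_irrefl _ (lt_trans hplt this)
    rw [List.filter_cons_of_pos (by simp [hnmem])]
    simp [ih hs.of_cons hd]

-- sorting src by key yields strictly increasing keys when the keys are distinct
theorem sorted_key_pairwise_lt (xs : List (String × Int)) (h : (xs.map Prod.fst).Nodup) :
    (PySem.List.sorted xs (fun kv => kv.1) false).Pairwise (fun a b => a.1 < b.1) := by
  have hperm : (PySem.List.sorted xs (fun kv => kv.1) false).Perm xs :=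
    PySem.List.sorted_perm xs _ false
  have hnd : ((PySem.List.sorted xs (fun kv => kv.1) false).map Prod.fst).Nodup :=
    (hperm.map Prod.fst).nodup_iff.mpr h
  have hle : (PySem.List.sorted xs (fun kv => kv.1) false).Pairwise (fun a b => a.1 ≤ b.1) :=
    PySem.List.sorted_pairwise xs (fun kv => kv.1)
  have hne : (PySem.List.sorted xs (fun kv => kv.1) false).Pairwise (fun a b => a.1 ≠ b.1) :=
    List.pairwise_map.mp hnd
  exact (hle.and hne).imp (fun ⟨h1, h2⟩ => lt_of_le_of_ne h1 h2)

-- ===== VERDICT (by name: the statement is the Claim_ definition above) =====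
theorem compute_transfer_plan_py_spec : Claim_equal_compute_transfer_plan_py := by
  intro src dst force _ hpre
  obtain ⟨hs, hd⟩ := hpre
  unfold Spec_compute_transfer_plan_py compute_transfer_plan_py compute_transfer_plan_py_alt
  cases force with
  | true => rfl
  | false =>
    simp only [Bool.false_eq_true, if_false]
    set ss := PySem.List.sorted src (fun kv => kv.1) false with hss
    set dd := PySem.List.sorted dst (fun kv => kv.1) false with hdd
    have hssP : ss.Pairwise (fun a b => a.1 < b.1) := sorted_key_pairwise_lt src hs
    have hddP : dd.Pairwise (fun a b => a.1 < b.1) := sorted_key_pairwise_lt dst hd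
    rw [pvMergePlan_eq_filter ss dd hssP hddP]
    -- membership in dd is membership in dst
    have hmemdd : ∀ x, (x ∈ dd) ↔ (x ∈ dst) := fun x => PySem.List.mem_sorted dst _ false x
    have h1 : ss.filter (fun p => !(decide (p ∈ dd)))
        = ss.filter (fun p => !((PySem.Dict.mk dst).contains p.1) || !((PySem.Dict.mk dst).get? p.1 == some p.2)) := by
      apply List.filter_congr
      intro p _
      rw [filter_pred_eq_not_mem dst hd p]
      simp [hmemdd p]
    rw [h1]
    -- both sides: strictly increasing rearrangement of the filtered keys
    apply PySem.List.sorted_eq_of_perm_of_pairwise_lt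
    · exact ((PySem.List.sorted_perm src _ false).filter _).map Prod.fst
    · exact List.pairwise_map.mpr (hssP.filter _)
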